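-- pv_equiv track=rewrite | github.com/chopparaanil/ddi | tail.py | _title_line_candidates
-- ===== SOURCE A (Python) =====
-- def _title_line_candidates(title):
--     words = [word for word in title.split() if word]
--     if len(words) <= 1:
--         return [[title]]
--
--     candidates = []
--     for split_at in range(1, len(words)):
--         candidates.append([" ".join(words[:split_at]), " ".join(words[split_at:])])
--     return candidates
-- ===== SOURCE B (Python) =====
-- def _title_line_candidates(title):
--     words = title.split()
--     if len(words) <= 1:
--         return [[title]]
--
--     def go(left, rest):
--         if not rest:
--             return []
--         return [[left, " ".join(rest)]] + go(left + " " + rest[0], rest[1:])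
--
--     return go(words[0], words[1:])
-- ===== Notes on version B (the rewrite author's own statement) =====
-- stated objective: alternative
-- what changed: Replaces the index loop that re-slices and re-joins the word list at every split point with a structural recursion over the word list that grows the left part incrementally by string concatenation (no slicing, no range, no prefix re-join).
import Mathlib
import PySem

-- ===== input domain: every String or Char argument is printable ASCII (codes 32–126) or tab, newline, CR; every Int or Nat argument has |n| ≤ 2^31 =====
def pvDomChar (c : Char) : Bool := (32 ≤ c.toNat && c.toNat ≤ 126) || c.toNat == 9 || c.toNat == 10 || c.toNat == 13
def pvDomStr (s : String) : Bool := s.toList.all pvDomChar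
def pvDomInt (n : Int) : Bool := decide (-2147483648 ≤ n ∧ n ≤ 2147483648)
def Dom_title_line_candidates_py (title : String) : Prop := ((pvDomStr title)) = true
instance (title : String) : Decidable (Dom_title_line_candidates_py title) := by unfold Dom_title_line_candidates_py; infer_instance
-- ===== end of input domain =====

-- B replaces A's index loop (slice + join of both halves at every split point) by a
-- structural recursion over the word list that grows the left half incrementally; a
-- different decomposition of similar cost, not claimed faster.

-- ===== PORT A =====
def title_line_candidates_py (title : String) : List (List String) :=
  let words := (PySem.Str.split₀ title).filter (fun word => !(word == ""))
  if words.length ≤ 1 then [[title]]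
  else
    (PySem.List.pyRange 1 (words.length : Int) 1).foldl
      (fun candidates split_at =>
        candidates ++ [[PySem.Str.join " " (PySem.List.slice words none (some split_at)),
                        PySem.Str.join " " (PySem.List.slice words (some split_at) none)]]) []

-- ===== PORT B =====
-- go(left, rest) from Source B
def pvGo (left : String) (rest : List String) : List (List String) :=
  match rest with
  | [] => []
  | r :: rs => [left, PySem.Str.join " " (r :: rs)] :: pvGo (left ++ " " ++ r) rs

def title_line_candidates_py_alt (title : String) : List (List String) :=
  let words := PySem.Str.split₀ title
  match words with
  | [] => [[title]]
  | [_] => [[title]]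
  | w :: rest => pvGo w rest

-- ===== PRECONDITION & SPEC =====
def Spec_title_line_candidates_py (title : String) (out : List (List String)) : Prop := out = title_line_candidates_py_alt title
instance (title : String) (out : List (List String)) : Decidable (Spec_title_line_candidates_py title out) := by unfold Spec_title_line_candidates_py; infer_instance

-- ===== CLAIM (what is proved, stated in full; the proofs are below) =====
def Claim_equal_title_line_candidates_py : Prop := ∀ (title : String), Dom_title_line_candidates_py title → Spec_title_line_candidates_py title (title_line_candidates_py title)

-- ===== LEMMAS AND PROOFS =====

-- every word produced by split₀.go is nonempty (given the accumulator only holds nonempty words)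
lemma pv_split0_go_ne_nil : ∀ (s cur : List Char) (acc : List (List Char)),
    (∀ w ∈ acc, w ≠ []) → ∀ w ∈ PySem.Chars.split₀.go s cur acc, w ≠ [] := by
  intro s
  induction s with
  | nil =>
      intro cur acc h w hw
      simp only [PySem.Chars.split₀.go] at hw
      split at hw
      · exact h w (List.mem_reverse.mp hw)
      · rcases List.mem_cons.mp (List.mem_reverse.mp hw) with rfl | h2
        · simpa using (by simpa [List.isEmpty_iff] using ‹¬ cur.isEmpty = true› : cur ≠ [])
        · exact h w h2
  | cons c rest ih =>
      intro cur acc h w hw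
      simp only [PySem.Chars.split₀.go] at hw
      split at hw
      · split at hw
        · exact ih [] acc h w hw
        · refine ih [] (cur.reverse :: acc) ?_ w hw
          intro v hv
          rcases List.mem_cons.mp hv with rfl | h2
          · simpa using (by simpa [List.isEmpty_iff] using ‹¬ cur.isEmpty = true› : cur ≠ [])
          · exact h v h2
      · exact ih (c :: cur) acc h w hw

lemma pv_split0_words_ne_empty (s : String) : ∀ w ∈ PySem.Str.split₀ s, w ≠ "" := by
  intro w hw
  rcases List.mem_map.mp (by simpa [PySem.Str.split₀] using hw) with ⟨l, hl, rfl⟩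
  have hne : l ≠ [] :=
    pv_split0_go_ne_nil s.toList [] [] (by simp) l (by simpa [PySem.Chars.split₀] using hl)
  intro hcontra
  apply hne
  have := congrArg String.toList hcontra
  simpa using this

lemma pv_filter_split0 (s : String) :
    (PySem.Str.split₀ s).filter (fun word => !(word == "")) = PySem.Str.split₀ s := by
  apply List.filter_eq_self.mpr
  intro w hw
  simpa using pv_split0_words_ne_empty s w hw

-- foldl-append is a map
lemma pv_foldl_append_map {α β : Type} (l : List α) (f : α → β) :
    ∀ init : List β, l.foldl (fun acc x => acc ++ [f x]) init = init ++ l.map f := by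
  induction l with
  | nil => simp
  | cons x xs ih => intro init; simp [List.foldl_cons, ih]

-- " ".join(a :: l) accumulates left to right
lemma pv_join_foldl : ∀ (l : List String) (a : String),
    PySem.Str.join " " (a :: l) = l.foldl (fun x y => x ++ " " ++ y) a := by
  intro l
  induction l with
  | nil =>
      intro a
      apply String.toList_inj.mp
      simp [PySem.Str.join, PySem.Chars.join_singleton]
  | cons b bs ih =>
      intro a
      have h1 : PySem.Str.join " " (a :: b :: bs) = PySem.Str.join " " ((a ++ " " ++ b) :: bs) := by
        apply String.toList_inj.mp
        cases bs with
        | nil => simp [PySem.Str.join, PySem.Chars.join_cons_cons, PySem.Chars.join_singleton]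
        | cons c cs => simp [PySem.Str.join, PySem.Chars.join_cons_cons]
      rw [List.foldl_cons, ← ih (a ++ " " ++ b)]
      exact h1

-- characterisation of B's recursion
lemma pv_go_eq : ∀ (rest : List String) (left : String),
    pvGo left rest = (List.range rest.length).map
      (fun i => [(rest.take i).foldl (fun x y => x ++ " " ++ y) left,
                 PySem.Str.join " " (rest.drop i)]) := by
  intro rest
  induction rest with
  | nil => intro left; simp [pvGo]
  | cons r rs ih =>
      intro left
      simp only [pvGo, List.length_cons, List.range_succ_eq_map, List.map_cons, List.map_map]
      rw [ih (left ++ " " ++ r)]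
      simp [Function.comp_def, List.take_succ_cons, List.drop_succ_cons, List.foldl_cons]

theorem title_line_candidates_py_spec : Claim_equal_title_line_candidates_py := by
  intro title _
  unfold Spec_title_line_candidates_py title_line_candidates_py title_line_candidates_py_alt
  simp only [pv_filter_split0]
  generalize PySem.Str.split₀ title = ws
  match ws with
  | [] => simp
  | [w] => simp
  | w :: r :: rs =>
    simp only [List.length_cons]
    rw [if_neg (by omega)]
    rw [pv_go_eq, PySem.List.pyRange_one, pv_foldl_append_map, List.map_map, List.nil_append]
    have hn : (((rs.length + 1 + 1 : Nat) : Int) - 1).toNat = rs.length + 1 := by omega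
    rw [hn]
    apply List.map_congr_left
    intro i hi
    have h1 : (1 + (i : Int)) = ((i + 1 : Nat) : Int) := by push_cast; ring
    simp only [Function.comp_apply, h1,
      PySem.List.slice_to_natCast, PySem.List.slice_from_natCast,
      List.take_succ_cons, List.drop_succ_cons]
    rw [pv_join_foldl]
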